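-- pv_equiv track=rewrite | github.com/103027/cyber-matrix | backend/app/routes/subdomains.py | get_title_server
-- ===== SOURCE A (Python) =====
-- def get_title_server(output):
--     title = None
--     server = None
--
--     if output:
--         lines = output.splitlines()
--         for line in lines:
--             if line.lower().startswith("server:"):
--                 server = line.split(":", 1)[1].strip()
--             elif line.lower().startswith("title:"):
--                 title = line.split(":", 1)[1].strip()
--
--     # Return the results
--     result = {
--         "title": title,
--         "server": server,
--
--     }
--
--     return result
-- ===== SOURCE B (Python) =====
-- def get_title_server(output):
--     lines = output.splitlines() if output else []
--     d = {}
--     for line in lines: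
--         if ":" in line:
--             k, v = line.split(":", 1)
--             d[k.lower()] = v.strip()
--     return {"title": d.get("title"), "server": d.get("server")}
-- ===== Notes on version B (the rewrite author's own statement) =====
-- stated objective: alternative
-- what changed: B replaces A's per-line startswith tests with a single pass that indexes every colon-bearing line into a dict keyed by the lowercased text before the first colon (last occurrence wins), then answers both fields by two dict lookups.
import Mathlib
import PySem

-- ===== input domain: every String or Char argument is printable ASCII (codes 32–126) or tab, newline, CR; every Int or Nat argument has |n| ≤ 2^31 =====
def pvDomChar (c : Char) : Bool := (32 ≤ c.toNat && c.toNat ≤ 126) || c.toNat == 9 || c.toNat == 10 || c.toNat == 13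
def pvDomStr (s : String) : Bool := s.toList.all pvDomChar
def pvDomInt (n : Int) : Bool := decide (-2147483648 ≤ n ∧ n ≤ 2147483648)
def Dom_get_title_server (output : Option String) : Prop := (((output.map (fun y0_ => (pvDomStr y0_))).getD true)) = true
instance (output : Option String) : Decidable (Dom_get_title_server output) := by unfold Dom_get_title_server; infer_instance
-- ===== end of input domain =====

-- B indexes colon-bearing lines into a dict (lowercased prefix key, last wins) and answers by two lookups instead of A's per-line prefix tests; alternative decomposition, return value proved equal.


-- ===== PORT A =====
-- loop body of A: 'if line.lower().startswith("server:"): server = … elif … "title:": title = …'.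
-- 'line.split(":", 1)[1]' is ported with getD: the [1] access is guarded by the startswith test,
-- which guarantees the line contains ':' and the split has two pieces, so Python never raises here.
def pvAStep (ts : Option (List Char) × Option (List Char)) (line : List Char) :
    Option (List Char) × Option (List Char) :=
  if PySem.Chars.startswith (PySem.Chars.lower line) "server:".toList then
    (ts.1, some (PySem.Chars.strip ((PySem.Chars.splitOnMax line ":".toList 1).getD 1 [])))
  else if PySem.Chars.startswith (PySem.Chars.lower line) "title:".toList then
    (some (PySem.Chars.strip ((PySem.Chars.splitOnMax line ":".toList 1).getD 1 [])), ts.2)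
  else ts

def get_title_server (output : Option String) : List (String × Option String) :=
  let ts : Option (List Char) × Option (List Char) :=
    match output with
    | some s =>
      if s.toList ≠ [] then (PySem.Chars.splitlines s.toList).foldl pvAStep (none, none)
      else (none, none)
    | none => (none, none)
  [("title", ts.1.map String.ofList), ("server", ts.2.map String.ofList)]

-- ===== PORT B =====
-- loop body of B: 'if ":" in line: k, v = line.split(":", 1); d[k.lower()] = v.strip()'.
-- The two-piece unpacking is guarded by the ':' membership test, so the wildcard arm is never taken.
def pvBStep (d : PySem.Dict (List Char) (List Char)) (line : List Char) :
    PySem.Dict (List Char) (List Char) :=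
  if PySem.Chars.isIn ":".toList line then
    match PySem.Chars.splitOnMax line ":".toList 1 with
    | [k, v] => d.insert (PySem.Chars.lower k) (PySem.Chars.strip v)
    | _ => d
  else d

def get_title_server_alt (output : Option String) : List (String × Option String) :=
  let lines : List (List Char) :=
    match output with
    | some s => if s.toList ≠ [] then PySem.Chars.splitlines s.toList else []
    | none => []
  let d := lines.foldl pvBStep PySem.Dict.empty
  [("title", (d.get? "title".toList).map String.ofList),
   ("server", (d.get? "server".toList).map String.ofList)]

-- ===== PRECONDITION & SPEC =====
def Spec_get_title_server (output : Option String) (out : List (String × Option String)) : Prop := out = get_title_server_alt output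
instance (output : Option String) (out : List (String × Option String)) : Decidable (Spec_get_title_server output out) := by unfold Spec_get_title_server; infer_instance

-- ===== CLAIM (what is proved, stated in full; the proofs are below) =====
def Claim_equal_get_title_server : Prop := ∀ (output : Option String), Dom_get_title_server output → Spec_get_title_server output (get_title_server output)

-- ===== LEMMAS AND PROOFS =====

-- lowering a character yields ':' only for ':' itself
theorem pv_lowerChar_colon (c : Char) : PySem.Chars.lowerChar c = ':' ↔ c = ':' := by
  unfold PySem.Chars.lowerChar PySem.Chars.isupper
  split_ifs with h
  · simp only [Bool.and_eq_true, decide_eq_true_eq, Char.le_def, UInt32.le_iff_toNat_le] at h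
    have hA : ('A' : Char).val.toNat = 65 := rfl
    have hZ : ('Z' : Char).val.toNat = 90 := rfl
    have hv : c.val.toNat = c.toNat := rfl
    rw [hA, hZ, hv] at h
    constructor
    · intro he
      have h2 := congrArg Char.toNat he
      rw [Char.toNat_ofNat, if_pos (Or.inl (by omega))] at h2
      have : (':' : Char).toNat = 58 := rfl
      omega
    · intro he
      subst he
      have : (':' : Char).toNat = 58 := rfl
      omega
  · exact Iff.rfl

theorem pv_isIn_colon (l : List Char) : PySem.Chars.isIn [':'] l = l.contains ':' := by
  by_cases h : ':' ∈ l
  · simp [PySem.Chars.isIn_iff_infix, List.singleton_infix_iff, h]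
  · simp [PySem.Chars.isIn_eq_false_iff, List.singleton_infix_iff, h]

-- split worker with an exhausted maxsplit budget returns the remainder as one piece
theorem pv_go_zero (sep : List Char) (fuel : Nat) (l cur : List Char) (acc : List (List Char)) :
    PySem.Chars.splitOnMax.go sep fuel 0 l cur acc = ((cur.reverse ++ l) :: acc).reverse := by
  cases fuel <;> cases l <;> simp [PySem.Chars.splitOnMax.go]

-- one step of the split worker for sep = ":"
theorem pv_go_step (fuel m : Nat) (hm : ¬ m = 0) (c : Char) (rest cur : List Char) (acc : List (List Char)) :
    PySem.Chars.splitOnMax.go [':'] (fuel + 1) m (c :: rest) cur acc =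
      if c = ':' then PySem.Chars.splitOnMax.go [':'] fuel (m - 1) rest [] (cur.reverse :: acc)
      else PySem.Chars.splitOnMax.go [':'] fuel m rest (c :: cur) acc := by
  conv_lhs => rw [PySem.Chars.splitOnMax.go.eq_def]
  simp only [if_neg hm]
  by_cases hc : c = ':'
  · subst hc
    rw [if_pos (by simp [List.isPrefixOf]), if_pos rfl]
    rfl
  · rw [if_neg, if_neg hc]
    simp [List.isPrefixOf, Ne.symm hc]

-- the split worker with budget 1 splits at the first ':'
theorem pv_go_one (l : List Char) : ∀ (cur : List Char) (acc : List (List Char)),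
    PySem.Chars.splitOnMax.go [':'] (l.length + 1) 1 l cur acc =
      if l.contains ':' then
        ((l.dropWhile (· ≠ ':')).tail :: (cur.reverse ++ l.takeWhile (· ≠ ':')) :: acc).reverse
      else ((cur.reverse ++ l) :: acc).reverse := by
  induction l with
  | nil => intro cur acc; simp [PySem.Chars.splitOnMax.go]
  | cons c rest ih =>
    intro cur acc
    rw [List.length_cons, pv_go_step _ _ (by omega)]
    by_cases hc : c = ':'
    · subst hc
      rw [if_pos rfl, pv_go_zero]
      rw [if_pos (by simp)]
      simp
    · rw [if_neg hc, ih]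
      by_cases hr : rest.contains ':' = true
      · rw [if_pos hr, if_pos (by simp; exact Or.inr (by simpa using hr))]
        simp [hc]
      · rw [if_neg hr, if_neg (by simp; exact ⟨Ne.symm hc, by simpa using hr⟩)]
        simp

theorem pv_split_colon (l : List Char) (h : l.contains ':' = true) :
    PySem.Chars.splitOnMax l [':'] 1 = [l.takeWhile (· ≠ ':'), (l.dropWhile (· ≠ ':')).tail] := by
  unfold PySem.Chars.splitOnMax
  rw [if_neg (by norm_num), show (1 : Int).toNat = 1 from rfl, pv_go_one l [] []]
  rw [if_pos h]
  rfl

-- a lowercased line starts with "<w>:" iff the line has a ':' and the lowercased text before its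
-- first ':' is exactly w (for colon-free w)
theorem pv_key_iff : ∀ (w : List Char), ':' ∉ w → ∀ l : List Char,
    PySem.Chars.startswith (PySem.Chars.lower l) (w ++ [':']) =
      (l.contains ':' && decide (PySem.Chars.lower (l.takeWhile (· ≠ ':')) = w)) := by
  intro w
  induction w with
  | nil =>
    intro _ l
    cases l with
    | nil => simp [PySem.Chars.startswith, PySem.Chars.lower]
    | cons c rest =>
      by_cases hc : c = ':'
      · subst hc
        simp [PySem.Chars.startswith, PySem.Chars.lower, List.isPrefixOf,
          show PySem.Chars.lowerChar ':' = ':' by decide]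
      · simp [PySem.Chars.startswith, PySem.Chars.lower, List.isPrefixOf, hc, Ne.symm hc]
        exact fun h => hc ((pv_lowerChar_colon c).mp h.symm)
  | cons w0 w' ih =>
    intro hw l
    have hw0 : w0 ≠ ':' := fun h => hw (by simp [h])
    have hw' : ':' ∉ w' := fun h => hw (by simp [h])
    cases l with
    | nil => simp [PySem.Chars.startswith, PySem.Chars.lower]
    | cons c rest =>
      have hLHS : PySem.Chars.startswith (PySem.Chars.lower (c :: rest)) ((w0 :: w') ++ [':'])
          = ((w0 == PySem.Chars.lowerChar c) &&
             PySem.Chars.startswith (PySem.Chars.lower rest) (w' ++ [':'])) := by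
        simp [PySem.Chars.startswith, PySem.Chars.lower, List.isPrefixOf]
      rw [hLHS, ih hw' rest]
      by_cases hc : c = ':'
      · subst hc
        have : (w0 == PySem.Chars.lowerChar ':') = false := by
          simp [show PySem.Chars.lowerChar ':' = ':' by decide, hw0]
        simp [this, PySem.Chars.lower]
      · simp only [List.takeWhile_cons, List.contains_cons, decide_eq_true_eq]
        have h1 : (':' == c) = false := by simp [Ne.symm hc]
        rw [h1]
        rw [if_pos (show c ≠ ':' from hc)]
        simp only [Bool.false_or]
        rw [show (w0 == PySem.Chars.lowerChar c) = decide (PySem.Chars.lowerChar c = w0) by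
          rw [Bool.beq_eq_decide_eq]; simp [eq_comm]]
        cases hb : rest.contains ':' <;> simp [PySem.Chars.lower]

-- one loop step: A's pair update tracks B's dict update through the "title"/"server" lookups
theorem pv_step (d : PySem.Dict (List Char) (List Char)) (line : List Char) :
    pvAStep (d.get? "title".toList, d.get? "server".toList) line =
      ((pvBStep d line).get? "title".toList, (pvBStep d line).get? "server".toList) := by
  have hcolon : (":".toList : List Char) = [':'] := rfl
  have hsw : PySem.Chars.startswith (PySem.Chars.lower line) "server:".toList =
      (line.contains ':' && decide (PySem.Chars.lower (line.takeWhile (· ≠ ':')) = "server".toList)) := by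
    rw [show ("server:".toList : List Char) = "server".toList ++ [':'] from rfl]
    exact pv_key_iff _ (by decide) line
  have htw : PySem.Chars.startswith (PySem.Chars.lower line) "title:".toList =
      (line.contains ':' && decide (PySem.Chars.lower (line.takeWhile (· ≠ ':')) = "title".toList)) := by
    rw [show ("title:".toList : List Char) = "title".toList ++ [':'] from rfl]
    exact pv_key_iff _ (by decide) line
  unfold pvAStep pvBStep
  rw [hcolon, pv_isIn_colon]
  by_cases hc : line.contains ':' = true
  · rw [pv_split_colon line hc, if_pos hc]
    set k := line.takeWhile (· ≠ ':') with hk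
    set v := (line.dropWhile (· ≠ ':')).tail with hv
    rw [hsw, htw, hc]
    simp only [Bool.true_and]
    by_cases h1 : PySem.Chars.lower k = "server".toList
    · rw [if_pos (by simp [h1])]
      rw [show ([k, v].getD 1 []) = v from rfl]
      refine Prod.ext ?_ ?_
      · simp only []
        rw [PySem.Dict.get?_insert_of_ne _ _ (by rw [h1]; decide)]
      · simp only []
        rw [h1, PySem.Dict.get?_insert_self]
    · rw [if_neg (by simpa using h1)]
      by_cases h2 : PySem.Chars.lower k = "title".toList
      · rw [if_pos (by simp [h2])]
        rw [show ([k, v].getD 1 []) = v from rfl]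
        refine Prod.ext ?_ ?_
        · simp only []
          rw [h2, PySem.Dict.get?_insert_self]
        · simp only []
          rw [PySem.Dict.get?_insert_of_ne _ _ (by rw [h2]; decide)]
      · rw [if_neg (by simpa using h2)]
        refine Prod.ext ?_ ?_
        · simp only []
          rw [PySem.Dict.get?_insert_of_ne _ _ (fun h => h2 h.symm)]
        · simp only []
          rw [PySem.Dict.get?_insert_of_ne _ _ (fun h => h1 h.symm)]
  · rw [if_neg hc, hsw, htw]
    have hcf : line.contains ':' = false := by simpa using hc
    rw [hcf]
    simp

-- the whole loop: A's fold over the lines equals the two lookups into B's dict fold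
theorem pv_fold (lines : List (List Char)) : ∀ (d : PySem.Dict (List Char) (List Char)),
    lines.foldl pvAStep (d.get? "title".toList, d.get? "server".toList) =
      ((lines.foldl pvBStep d).get? "title".toList, (lines.foldl pvBStep d).get? "server".toList) := by
  induction lines with
  | nil => intro d; rfl
  | cons line rest ih =>
    intro d
    simp only [List.foldl_cons, pv_step d line]
    exact ih (pvBStep d line)

-- ===== VERDICT (by name: the statement is the Claim_ definition above) =====
theorem get_title_server_spec : Claim_equal_get_title_server := by
  intro output _
  unfold Spec_get_title_server get_title_server get_title_server_alt
  cases output with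
  | none => rfl
  | some s =>
    by_cases hs : s.toList = []
    · simp [hs]
    · simp only [hs, ne_eq, not_false_iff, if_true]
      have h0 : ((none, none) : Option (List Char) × Option (List Char)) =
          ((PySem.Dict.empty : PySem.Dict (List Char) (List Char)).get? "title".toList,
           (PySem.Dict.empty : PySem.Dict (List Char) (List Char)).get? "server".toList) := rfl
      rw [h0, pv_fold]
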